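-- pv_equiv track=rewrite | github.com/nbrader/proofs-bird-meertens | Python/test_LHS_RHS.py | LHS
-- ===== SOURCE A (Python) =====
-- def nonNegPlus(v, x):
--     """Coq's nonNegPlus: v + x but truncated to be >= 0"""
--     return max(0, v + x)
--
-- def LHS(ys, u_acc, v_acc):
--     acc = (u_acc, v_acc)
--     for x in ys:
--         u, v = acc
--         v_new = nonNegPlus(v, x)
--         u_new = max(u, v_new)
--         acc = (u_new, v_new)
--     return acc
-- ===== SOURCE B (Python) =====
-- def LHS(ys, u_acc, v_acc):
--     # Scan phase: full truncated running prefix sums, starting with the seed.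
--     scan = [v_acc]
--     for x in ys:
--         scan.append(max(0, scan[-1] + x))
--     # Reduce phase: v is the last scan value; u is max of u_acc and all post-seed values.
--     v = scan[-1]
--     u = u_acc
--     for s in scan[1:]:
--         u = max(u, s)
--     return (u, v)
-- ===== Notes on version B (the rewrite author's own statement) =====
-- stated objective: alternative
-- what changed: Replaces the single interleaved pair-state fold by a two-phase decomposition: first build the truncated prefix-sum scan as a list, then take its last element for v and a separate max-reduction over the post-seed scan values for u.
import Mathlib
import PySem

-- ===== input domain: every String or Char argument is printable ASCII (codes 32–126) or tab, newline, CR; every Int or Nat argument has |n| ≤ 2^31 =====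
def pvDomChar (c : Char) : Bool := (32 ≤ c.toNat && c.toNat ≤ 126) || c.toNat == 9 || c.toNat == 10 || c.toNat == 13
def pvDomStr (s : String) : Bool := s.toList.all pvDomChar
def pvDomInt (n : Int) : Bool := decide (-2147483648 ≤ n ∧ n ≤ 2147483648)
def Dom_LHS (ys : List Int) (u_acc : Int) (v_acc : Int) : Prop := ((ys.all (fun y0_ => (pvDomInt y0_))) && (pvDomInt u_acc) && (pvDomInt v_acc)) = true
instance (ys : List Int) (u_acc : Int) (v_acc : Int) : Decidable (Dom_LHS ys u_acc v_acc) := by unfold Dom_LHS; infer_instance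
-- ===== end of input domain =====

-- B replaces A's interleaved pair-state fold by a scan phase followed by a separate max-reduction (alternative decomposition, same cost).

-- ===== PORT A =====
def nonNegPlus (v x : Int) : Int := max 0 (v + x)

def LHS (ys : List Int) (u_acc : Int) (v_acc : Int) : Int × Int :=
  ys.foldl
    (fun acc x =>
      let v_new := nonNegPlus acc.2 x
      let u_new := max acc.1 v_new
      (u_new, v_new))
    (u_acc, v_acc)

-- ===== PORT B =====
-- scan phase: List.scanl ports Source B's append loop building the truncated prefix sums
def LHS_alt (ys : List Int) (u_acc : Int) (v_acc : Int) : Int × Int :=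
  let scan := List.scanl (fun v x => max 0 (v + x)) v_acc ys
  let v := scan.getLastD v_acc
  let u := scan.tail.foldl (fun u s => max u s) u_acc
  (u, v)

-- ===== PRECONDITION & SPEC =====
def Spec_LHS (ys : List Int) (u_acc : Int) (v_acc : Int) (out : Int × Int) : Prop := out = LHS_alt ys u_acc v_acc
instance (ys : List Int) (u_acc : Int) (v_acc : Int) (out : Int × Int) : Decidable (Spec_LHS ys u_acc v_acc out) := by unfold Spec_LHS; infer_instance

-- ===== CLAIM (what is proved, stated in full; the proofs are below) =====
def Claim_equal_LHS : Prop := ∀ (ys : List Int) (u_acc : Int) (v_acc : Int), Dom_LHS ys u_acc v_acc → Spec_LHS ys u_acc v_acc (LHS ys u_acc v_acc)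

-- ===== LEMMAS AND PROOFS =====
theorem scanl_head_tail (f : Int → Int → Int) (b : Int) (l : List Int) :
    List.scanl f b l = b :: (List.scanl f b l).tail := by
  cases l <;> simp [List.scanl_cons]

theorem scanl_getLastD (f : Int → Int → Int) (ys : List Int) (v d : Int) :
    (List.scanl f v ys).getLastD d = List.foldl f v ys := by
  induction ys generalizing v d with
  | nil => simp [List.scanl_nil]
  | cons y ys ih => rw [List.scanl_cons, List.getLastD_cons, ih, List.foldl_cons]

theorem LHS_eq (ys : List Int) (u v : Int) :
    LHS ys u v
      = ((List.scanl (fun v x => max 0 (v + x)) v ys).tail.foldl (fun u s => max u s) u,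
         List.foldl (fun v x => max 0 (v + x)) v ys) := by
  induction ys generalizing u v with
  | nil => simp [LHS, List.scanl_nil]
  | cons y ys ih =>
    have h := scanl_head_tail (fun v x => max 0 (v + x)) (max 0 (v + y)) ys
    simp only [LHS, nonNegPlus, List.foldl_cons, List.scanl_cons, List.tail_cons]
    rw [h, List.foldl_cons]
    simpa [LHS, nonNegPlus] using ih (max u (max 0 (v + y))) (max 0 (v + y))

-- ===== VERDICT (by name: the statement is the Claim_ definition above) =====
theorem LHS_spec : Claim_equal_LHS := by
  intro ys u v _
  unfold Spec_LHS LHS_alt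
  simp only [LHS_eq, scanl_getLastD]
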